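-- pv_equiv track=rewrite | github.com/huridocs/trainable-entity-extractor | src/trainable_entity_extractor/drivers/research_multi_option_extraction/get_summaries.py | clean_content_pdf_token
-- ===== SOURCE A (Python) =====
-- def clean_content_pdf_token(texts):
--     all_text = " ".join(texts)
--     all_text_words = all_text.split()
--     clean_words = list()
--     for word in all_text_words:
--         clean_word = "".join([x for x in word if x.isalpha()])
--         if clean_word:
--             clean_words.append(clean_word)
--     return clean_words
-- ===== SOURCE B (Python) =====
-- def clean_content_pdf_token(texts):
--     # One pass per text over its characters with a current-word buffer of letters;
--     # whitespace flushes the buffer, non-alpha non-space chars are simply skipped.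
--     # The boundary between two texts acts as the joining space: flush there too.
--     words = []
--     for text in texts:
--         buf = []
--         for ch in text:
--             if ch.isspace():
--                 if buf:
--                     words.append("".join(buf))
--                     buf = []
--             elif ch.isalpha():
--                 buf.append(ch)
--         if buf:
--             words.append("".join(buf))
--     return words
-- ===== Notes on version B (the rewrite author's own statement) =====
-- stated objective: alternative
-- what changed: Replaces join-then-split-then-per-word-filter (three passes building intermediate strings) with a single character pass per text maintaining a letters-only buffer that whitespace (and the text boundary) flushes.
import Mathlib
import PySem

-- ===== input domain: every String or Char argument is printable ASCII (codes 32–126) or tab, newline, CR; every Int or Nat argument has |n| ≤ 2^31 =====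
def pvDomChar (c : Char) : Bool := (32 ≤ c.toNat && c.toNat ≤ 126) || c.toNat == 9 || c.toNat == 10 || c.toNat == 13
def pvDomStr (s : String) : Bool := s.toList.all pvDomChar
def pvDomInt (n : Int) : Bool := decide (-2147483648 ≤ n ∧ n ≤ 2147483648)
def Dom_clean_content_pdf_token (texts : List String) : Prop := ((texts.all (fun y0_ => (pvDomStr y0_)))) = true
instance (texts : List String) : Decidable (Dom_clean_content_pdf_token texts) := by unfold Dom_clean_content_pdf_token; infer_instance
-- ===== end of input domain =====

-- B replaces join-then-split-then-per-word-filter with a single character pass per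
-- text maintaining a letters-only buffer flushed at whitespace (alternative, same cost).


-- ===== PORT A =====
def clean_content_pdf_token (texts : List String) : List String :=
  let all_text := PySem.Str.join " " texts
  let all_text_words := PySem.Str.split₀ all_text
  all_text_words.foldl (fun clean_words word =>
    let clean_word := String.ofList (word.toList.filter (fun x => PySem.Chars.isalpha x))
    if clean_word = "" then clean_words else clean_words ++ [clean_word]) []

-- ===== PORT B =====
-- inner 'for ch in text' loop of B: state = (current-word buffer, emitted words)
def altGo (cs : List Char) (buf : List Char) (words : List String) :
    List Char × List String :=
  match cs with
  | [] => (buf, words)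
  | c :: rest =>
    if PySem.Chars.isspace c then
      if buf.isEmpty then altGo rest buf words
      else altGo rest [] (words ++ [String.ofList buf])
    else if PySem.Chars.isalpha c then
      altGo rest (buf ++ [c]) words
    else
      altGo rest buf words

-- B's end-of-text flush: 'if buf: words.append("".join(buf))'
def altFlush (s : List Char × List String) : List String :=
  if s.1.isEmpty then s.2 else s.2 ++ [String.ofList s.1]

def clean_content_pdf_token_alt (texts : List String) : List String :=
  texts.foldl (fun words text => altFlush (altGo text.toList [] words)) []

-- ===== PRECONDITION & SPEC =====
def Spec_clean_content_pdf_token (texts : List String) (out : List String) : Prop := out = clean_content_pdf_token_alt texts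
instance (texts : List String) (out : List String) : Decidable (Spec_clean_content_pdf_token texts out) := by unfold Spec_clean_content_pdf_token; infer_instance

-- ===== CLAIM (what is proved, stated in full; the proofs are below) =====
def Claim_equal_clean_content_pdf_token : Prop := ∀ (texts : List String), Dom_clean_content_pdf_token texts → Spec_clean_content_pdf_token texts (clean_content_pdf_token texts)

-- ===== LEMMAS AND PROOFS =====

-- accumulator-free reformulation of PySem.Chars.split₀.go
def spWords (cs : List Char) (cur : List Char) : List (List Char) :=
  match cs with
  | [] => if cur.isEmpty then [] else [cur.reverse]
  | c :: rest =>
    if PySem.Chars.isspace c then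
      if cur.isEmpty then spWords rest [] else cur.reverse :: spWords rest []
    else spWords rest (c :: cur)

theorem go_eq_spWords (cs : List Char) :  ∀ (cur : List Char) (acc : List (List Char)),
    PySem.Chars.split₀.go cs cur acc = acc.reverse ++ spWords cs cur := by
  induction cs with
  | nil => intro cur acc; simp [PySem.Chars.split₀.go, spWords]; split <;> simp
  | cons c rest ih =>
    intro cur acc
    simp only [PySem.Chars.split₀.go, spWords]
    split
    · split
      · simp [ih]
      · simp [ih]
    · exact ih _ _

-- A's per-word contribution
def aWord (w : List Char) : List String :=
  let cw := w.filter (fun x => PySem.Chars.isalpha x)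
  if cw.isEmpty then [] else [String.ofList cw]

theorem ofList_eq_empty_iff (l : List Char) : (String.ofList l = "") ↔ l = [] := by
  constructor
  · intro h; have := congrArg String.toList h; simpa using this
  · intro h; simp [h]

-- A's foldl over words collapses to flatMap of aWord
theorem afold_eq_flatMap (ws : List String) : ∀ (acc : List String),
    ws.foldl (fun clean_words word =>
      let clean_word := String.ofList (word.toList.filter (fun x => PySem.Chars.isalpha x))
      if clean_word = "" then clean_words else clean_words ++ [clean_word]) acc
      = acc ++ ws.flatMap (fun word => aWord word.toList) := by
  induction ws with
  | nil => intro acc; simp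
  | cons w rest ih =>
    intro acc
    simp only [List.foldl_cons, List.flatMap_cons, ih, aWord]
    by_cases h : w.toList.filter (fun x => PySem.Chars.isalpha x) = []
    · simp [h, ofList_eq_empty_iff]
    · simp [h, ofList_eq_empty_iff, List.isEmpty_iff]

theorem exists_of_filter_ne {p : Char → Bool} (cur : List Char)
    (hf : ¬ cur.reverse.filter p = []) : ∃ x ∈ cur, p x = true := by
  rcases List.exists_mem_of_ne_nil _ hf with ⟨x, hx⟩
  rcases List.mem_filter.mp hx with ⟨h1, h2⟩
  exact ⟨x, List.mem_reverse.mp h1, h2⟩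

theorem aWord_nil (w : List Char) (h : w.filter (fun x => PySem.Chars.isalpha x) = []) :
    aWord w = [] := by simp [aWord, h]

theorem aWord_cons (w : List Char) (h : ¬ w.filter (fun x => PySem.Chars.isalpha x) = []) :
    aWord w = [String.ofList (w.filter (fun x => PySem.Chars.isalpha x))] := by
  simp only [aWord]
  rw [if_neg (by simpa [List.isEmpty_iff] using h)]

-- main invariant: B's char loop versus split-then-filter, related by
-- buf = (filtered letters of the reversed current chunk)
theorem altGo_eq_spWords (cs : List Char) : ∀ (cur : List Char) (words : List String),
    altFlush (altGo cs (cur.reverse.filter (fun x => PySem.Chars.isalpha x)) words)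
      = words ++ (spWords cs cur).flatMap aWord := by
  induction cs with
  | nil =>
    intro cur words
    simp only [altGo, spWords, altFlush]
    by_cases hc : cur = []
    · simp [hc]
    · by_cases hf : cur.reverse.filter (fun x => PySem.Chars.isalpha x) = []
      · simp [hf, hc, aWord_nil _ hf]
      · have hex := exists_of_filter_ne cur hf
        simp [List.isEmpty_iff, hc, aWord_cons _ hf, hex]
  | cons c rest ih =>
    intro cur words
    simp only [altGo, spWords]
    by_cases hs : PySem.Chars.isspace c = true
    · simp only [hs, if_pos]
      by_cases hf : cur.reverse.filter (fun x => PySem.Chars.isalpha x) = []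
      · rw [if_pos (by simp [hf])]
        have h0 := ih [] words
        simp only [List.reverse_nil, List.filter_nil] at h0
        rw [hf, h0]
        by_cases hc : cur = []
        · simp [hc]
        · simp [List.isEmpty_iff, hc, aWord_nil _ hf]
      · rw [if_neg (by simpa [List.isEmpty_iff] using hf)]
        have hc : cur ≠ [] := by
          intro h; rw [h] at hf; simp at hf
        have h0 := ih [] (words ++ [String.ofList (cur.reverse.filter (fun x => PySem.Chars.isalpha x))])
        simp only [List.reverse_nil, List.filter_nil] at h0
        rw [h0]
        have hex := exists_of_filter_ne cur hf
        simp [List.isEmpty_iff, hc, aWord_cons _ hf, List.append_assoc, hex]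
    · simp only [hs, if_neg, Bool.false_eq_true, not_false_iff]
      by_cases ha : PySem.Chars.isalpha c = true
      · rw [if_pos ha]
        have : cur.reverse.filter (fun x => PySem.Chars.isalpha x) ++ [c]
            = (c :: cur).reverse.filter (fun x => PySem.Chars.isalpha x) := by
          simp [List.filter_append, ha]
        rw [this, ih]
      · rw [if_neg ha]
        have : cur.reverse.filter (fun x => PySem.Chars.isalpha x)
            = (c :: cur).reverse.filter (fun x => PySem.Chars.isalpha x) := by
          simp [List.filter_append, ha]
        rw [this, ih]

-- altGo distributes over list append
theorem altGo_append (a b : List Char) : ∀ (buf : List Char) (words : List String),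
    altGo (a ++ b) buf words = altGo b (altGo a buf words).1 (altGo a buf words).2 := by
  induction a with
  | nil => intro buf words; simp [altGo]
  | cons c rest ih =>
    intro buf words
    simp only [List.cons_append, altGo]
    split
    · split <;> exact ih _ _
    · split <;> exact ih _ _

-- B's per-text fold equals one scan of the space-joined character list
theorem alt_fold_eq_join (texts : List String) : ∀ (words : List String),
    texts.foldl (fun words text => altFlush (altGo text.toList [] words)) words
      = altFlush (altGo (List.intercalate [' '] (texts.map String.toList)) [] words) := by
  induction texts with
  | nil => intro words; simp [altGo, altFlush, List.intercalate]
  | cons t rest ih =>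
    intro words
    cases rest with
    | nil => simp [List.intercalate]
    | cons t' rest' =>
      have hic : List.intercalate [' '] ((t :: t' :: rest').map String.toList)
          = t.toList ++ ' ' :: List.intercalate [' '] ((t' :: rest').map String.toList) := by
        simp [List.intercalate, List.intersperse]
      rw [List.foldl_cons, ih, hic, altGo_append]
      set st := altGo t.toList [] words with hst
      show altFlush (altGo (List.intercalate [' '] ((t' :: rest').map String.toList)) [] (altFlush st))
          = altFlush (altGo (' ' :: List.intercalate [' '] ((t' :: rest').map String.toList)) st.1 st.2)
      have hsp : PySem.Chars.isspace ' ' = true := by decide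
      simp only [altGo, hsp, if_pos]
      by_cases hb : st.1 = []
      · simp [altFlush, hb]
      · simp [altFlush, List.isEmpty_iff, hb]

-- the joined string at character level
theorem join_toList (texts : List String) :
    (PySem.Str.join " " texts).toList = List.intercalate [' '] (texts.map String.toList) := by
  rw [PySem.Str.toList_join]
  simp [PySem.Chars.join]

-- ===== VERDICT (by name: the statement is the Claim_ definition above) =====
theorem clean_content_pdf_token_spec : Claim_equal_clean_content_pdf_token := by
  intro texts _
  unfold Spec_clean_content_pdf_token clean_content_pdf_token clean_content_pdf_token_alt
  rw [afold_eq_flatMap, List.nil_append, alt_fold_eq_join]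
  have hmap : (PySem.Str.split₀ (PySem.Str.join " " texts)).flatMap (fun word => aWord word.toList)
      = ((PySem.Str.split₀ (PySem.Str.join " " texts)).map String.toList).flatMap aWord := by
    rw [List.flatMap_map]
  rw [hmap, PySem.Str.split₀_map_toList, join_toList]
  have h := altGo_eq_spWords (List.intercalate [' '] (texts.map String.toList)) [] []
  simp only [List.reverse_nil, List.filter_nil, List.nil_append] at h
  rw [h, PySem.Chars.split₀, go_eq_spWords]
  simp
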